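-- pv_equiv track=rewrite | github.com/Xander-git/array-randomizer | array_randomizer.py | _is_adjacent_to_negative
-- ===== SOURCE A (Python) =====
-- from typing import List, Dict, Tuple, Optional, Union
--
-- def _is_adjacent_to_negative(position: Tuple[int, int],
--                              negative_positions: List[Tuple[int, int]]) -> bool:
--     """
--     Check if a position is adjacent (including diagonally) to any negative position.
--
--     Args:
--         position: (row, col) tuple to check
--         negative_positions: List of existing negative positions
--
--     Returns:
--         True if position is adjacent to any negative, False otherwise
--     """
--     row, col = position
--     for neg_row, neg_col in negative_positions:
--         # Check all 8 neighbors (cardinal + diagonal)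
--         if abs(row - neg_row) <= 1 and abs(col - neg_col) <= 1:
--             if (row, col) != (neg_row, neg_col):  # Not the same position
--                 return True
--     return False
-- ===== SOURCE B (Python) =====
-- def _is_adjacent_to_negative(position, negative_positions):
--     negatives = {(nr, nc) for nr, nc in negative_positions}
--     row, col = position
--     return any((row + dr, col + dc) in negatives
--                for dr in (-1, 0, 1) for dc in (-1, 0, 1)
--                if (dr, dc) != (0, 0))
-- ===== Notes on version B (the rewrite author's own statement) =====
-- stated objective: idiomatic
-- what changed: Instead of scanning the list with distance arithmetic per element, B builds a set of the negative positions once and tests membership of the 8 fixed neighbor coordinates.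
import Mathlib
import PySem

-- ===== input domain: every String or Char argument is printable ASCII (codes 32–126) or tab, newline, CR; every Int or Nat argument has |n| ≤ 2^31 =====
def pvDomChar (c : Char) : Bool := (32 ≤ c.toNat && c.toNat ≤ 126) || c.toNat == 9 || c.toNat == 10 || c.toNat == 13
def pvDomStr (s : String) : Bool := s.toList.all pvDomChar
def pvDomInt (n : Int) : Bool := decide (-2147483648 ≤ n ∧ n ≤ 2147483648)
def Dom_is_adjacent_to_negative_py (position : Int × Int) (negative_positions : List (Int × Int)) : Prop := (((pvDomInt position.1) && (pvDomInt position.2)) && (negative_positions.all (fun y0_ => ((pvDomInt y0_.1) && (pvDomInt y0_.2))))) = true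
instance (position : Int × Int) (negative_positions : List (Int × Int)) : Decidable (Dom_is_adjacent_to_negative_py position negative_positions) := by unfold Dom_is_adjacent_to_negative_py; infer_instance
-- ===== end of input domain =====

-- B replaces A's per-element distance scan by a set of the negatives plus membership
-- tests of the 8 fixed neighbor coordinates (idiomatic; same asymptotic cost).

-- ===== PORT A =====
-- the for-loop over negative_positions: return True on the first adjacent, distinct element
def is_adjacent_loop (row col : Int) : List (Int × Int) → Bool
  | [] => false
  | (neg_row, neg_col) :: rest =>
    if |row - neg_row| ≤ 1 ∧ |col - neg_col| ≤ 1 then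
      if (row, col) ≠ (neg_row, neg_col) then true
      else is_adjacent_loop row col rest
    else is_adjacent_loop row col rest

def is_adjacent_to_negative_py (position : Int × Int) (negative_positions : List (Int × Int)) : Bool :=
  is_adjacent_loop position.1 position.2 negative_positions

-- ===== PORT B =====
-- the 8 (dr, dc) offsets generated by 'for dr in (-1,0,1) for dc in (-1,0,1) if (dr,dc) != (0,0)'
def pvDeltas : List (Int × Int) :=
  [(-1, -1), (-1, 0), (-1, 1), (0, -1), (0, 1), (1, -1), (1, 0), (1, 1)]

def is_adjacent_to_negative_py_alt (position : Int × Int) (negative_positions : List (Int × Int)) : Bool :=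
  let negatives : PySem.Set (Int × Int) := PySem.Set.ofList negative_positions
  pvDeltas.any (fun d => PySem.Set.contains negatives (position.1 + d.1, position.2 + d.2))

-- ===== PRECONDITION & SPEC =====
def Spec_is_adjacent_to_negative_py (position : Int × Int) (negative_positions : List (Int × Int)) (out : Bool) : Prop := out = is_adjacent_to_negative_py_alt position negative_positions
instance (position : Int × Int) (negative_positions : List (Int × Int)) (out : Bool) : Decidable (Spec_is_adjacent_to_negative_py position negative_positions out) := by unfold Spec_is_adjacent_to_negative_py; infer_instance

-- ===== CLAIM (what is proved, stated in full; the proofs are below) =====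
def Claim_equal_is_adjacent_to_negative_py : Prop := ∀ (position : Int × Int) (negative_positions : List (Int × Int)), Dom_is_adjacent_to_negative_py position negative_positions → Spec_is_adjacent_to_negative_py position negative_positions (is_adjacent_to_negative_py position negative_positions)

-- ===== LEMMAS AND PROOFS =====

-- A's loop returns true iff some list element is adjacent and distinct
theorem is_adjacent_loop_eq_true (row col : Int) (l : List (Int × Int)) :
    is_adjacent_loop row col l = true ↔
      ∃ p ∈ l, |row - p.1| ≤ 1 ∧ |col - p.2| ≤ 1 ∧ (row, col) ≠ p := by
  induction l with
  | nil => simp [is_adjacent_loop]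
  | cons hd tl ih =>
    obtain ⟨nr, nc⟩ := hd
    simp only [is_adjacent_loop]
    split_ifs with h1 h2
    · simp only [true_iff]
      exact ⟨(nr, nc), by simp, h1.1, h1.2, h2⟩
    · rw [ih]
      constructor
      · rintro ⟨p, hp, h⟩; exact ⟨p, List.mem_cons_of_mem _ hp, h⟩
      · rintro ⟨p, hp, ha, hb, hne⟩
        rcases List.mem_cons.1 hp with rfl | hp
        · exact absurd (not_not.1 h2) hne
        · exact ⟨p, hp, ha, hb, hne⟩
    · rw [ih]
      constructor
      · rintro ⟨p, hp, h⟩; exact ⟨p, List.mem_cons_of_mem _ hp, h⟩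
      · rintro ⟨p, hp, ha, hb, hne⟩
        rcases List.mem_cons.1 hp with rfl | hp
        · exact absurd ⟨ha, hb⟩ h1
        · exact ⟨p, hp, ha, hb, hne⟩

-- B returns true iff some neighbor coordinate occurs in the list
theorem alt_eq_true (position : Int × Int) (l : List (Int × Int)) :
    is_adjacent_to_negative_py_alt position l = true ↔
      ∃ d ∈ pvDeltas, (position.1 + d.1, position.2 + d.2) ∈ l := by
  simp [is_adjacent_to_negative_py_alt, PySem.Set.mem_ofList]

-- ===== VERDICT (by name: the statement is the Claim_ definition above) =====
theorem is_adjacent_to_negative_py_spec : Claim_equal_is_adjacent_to_negative_py := by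
  intro position negative_positions _
  unfold Spec_is_adjacent_to_negative_py is_adjacent_to_negative_py
  obtain ⟨row, col⟩ := position
  rw [Bool.eq_iff_iff, is_adjacent_loop_eq_true, alt_eq_true]
  constructor
  · rintro ⟨⟨nr, nc⟩, hmem, ha, hb, hne⟩
    refine ⟨(nr - row, nc - col), ?_, by simpa using hmem⟩
    have hne' : ¬(row = nr ∧ col = nc) := by simpa [Prod.ext_iff] using hne
    simp only [abs_le] at ha hb
    simp only [pvDeltas, List.mem_cons, List.not_mem_nil, or_false, Prod.mk.injEq]
    omega
  · rintro ⟨d, hd, hmem⟩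
    refine ⟨(row + d.1, col + d.2), hmem, ?_, ?_, ?_⟩ <;>
      (fin_cases hd <;> simp [Prod.ext_iff])
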